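-- pv_equiv track=rewrite | github.com/saumya-singh/CodeLab | HackerRank/Implementation/Jumping_On_The_Clouds_Revisited.py | energyLeft
-- ===== SOURCE A (Python) =====
-- def energyLeft(n, k, c):
--     E = 100
--     i = (0 + k) % n
--     while i != 0:
--         if c[i] == 0:
--             E -= 1
--         elif c[i] == 1:
--             E -= 3
--         i = (i + k) % n
--
--     if i == 0:
--         if c[i] == 0:
--             E -= 1
--         elif c[i] == 1:
--             E -= 3
--
--     return E
-- ===== SOURCE B (Python) =====
-- from math import gcd
--
-- def energyLeft(n, k, c):
--     g = gcd(n, k)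
--     drain = 0
--     for i in range(0, n, g):
--         if c[i] == 1:
--             drain += 3
--         elif c[i] == 0:
--             drain += 1
--     return 100 - drain
-- ===== Notes on version B (the rewrite author's own statement) =====
-- stated objective: simpler
-- what changed: B replaces A's step-and-wrap while-loop simulation (and its duplicated final i==0 block) by a single arithmetic pass over range(0, n, gcd(n, k)), the exact set of clouds the jumps visit; Pre_ restricts to the natural domain 0 < n with all visited indices in range (n is the number of clouds: A raises ZeroDivisionError on n == 0, and on negative n its value comes from Python's negative modulus and negative-index wraparound, which B does not reproduce).
-- outside the precondition, e.g. on energyLeft(-2, 2, [0, 0]): A returns 99, B returns 100; on energyLeft(0, 1, [0]): A raises ZeroDivisionError, B returns 100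
import Mathlib
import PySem

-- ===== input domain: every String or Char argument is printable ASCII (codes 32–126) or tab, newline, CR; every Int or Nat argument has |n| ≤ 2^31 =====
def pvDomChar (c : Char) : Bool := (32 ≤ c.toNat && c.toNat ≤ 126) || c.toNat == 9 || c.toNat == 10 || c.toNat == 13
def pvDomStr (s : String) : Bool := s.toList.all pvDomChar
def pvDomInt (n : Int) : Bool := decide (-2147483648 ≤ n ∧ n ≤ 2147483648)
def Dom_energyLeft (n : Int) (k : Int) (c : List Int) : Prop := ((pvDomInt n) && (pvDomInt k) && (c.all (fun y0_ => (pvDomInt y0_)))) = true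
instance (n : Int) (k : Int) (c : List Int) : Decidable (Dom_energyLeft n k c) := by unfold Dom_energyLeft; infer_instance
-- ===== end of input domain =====

-- B replaces A's step-and-wrap while-loop simulation by a single pass over range(0, n, gcd(n, k)),
-- the set of clouds the jumps visit (objective: simpler — no jump is simulated).

-- ===== PORT A =====
-- the while loop: state (i, E); fuel only makes the recursion structural (the loop runs at most |n| times on Pre_)
def energyLeftLoop (n : Int) (k : Int) (c : List Int) : Nat → Int → Int → Int × Int
  | 0, i, E => (E, i)
  | fuel+1, i, E =>
    if i = 0 then (E, i)
    else
      let E' :=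
        match PySem.List.pyGet? c i with
        | some v => if v = 0 then E - 1 else if v = 1 then E - 3 else E
        | none => E                                  -- c[i] raises here: excluded by Pre_
      energyLeftLoop n k c fuel (PySem.Int.mod (i + k) n) E'

def energyLeft (n : Int) (k : Int) (c : List Int) : Int :=
  let i0 := PySem.Int.mod (0 + k) n                  -- i = (0 + k) % n  (n = 0 raises: excluded by Pre_)
  let p := energyLeftLoop n k c (n.natAbs + 1) i0 100
  if p.2 = 0 then
    match PySem.List.pyGet? c p.2 with
    | some v => if v = 0 then p.1 - 1 else if v = 1 then p.1 - 3 else p.1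
    | none => p.1
  else p.1

-- ===== PORT B =====
def energyLeft_alt (n : Int) (k : Int) (c : List Int) : Int :=
  let g : Int := Int.gcd n k
  let drain := (PySem.List.pyRange 0 n g).foldl
    (fun d i =>
      match PySem.List.pyGet? c i with
      | some v => if v = 1 then d + 3 else if v = 0 then d + 1 else d
      | none => d) 0
  100 - drain

-- ===== PRECONDITION & SPEC =====
-- Pre_ restricts to the task's natural domain: n, the number of clouds, is positive (A raises
-- ZeroDivisionError on n = 0, and on n < 0 its value comes from Python's negative modulus and
-- negative-index wraparound, which is accidental), and c is long enough that every visited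
-- index (the multiples of gcd(n,k) below n) is in range.
def Pre_energyLeft (n : Int) (k : Int) (c : List Int) : Prop :=
  0 < n ∧ n - (Int.gcd n k : Int) < c.length
instance (n : Int) (k : Int) (c : List Int) : Decidable (Pre_energyLeft n k c) := by unfold Pre_energyLeft; infer_instance

def pvWitness_energyLeft : Int × Int × List Int := (2, 2, [0, 0])

def Spec_energyLeft (n : Int) (k : Int) (c : List Int) (out : Int) : Prop := out = energyLeft_alt n k c
instance (n : Int) (k : Int) (c : List Int) (out : Int) : Decidable (Spec_energyLeft n k c out) := by unfold Spec_energyLeft; infer_instance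

-- ===== CLAIM (what is proved, stated in full; the proofs are below) =====
def Claim_equal_energyLeft : Prop := ∀ (n : Int) (k : Int) (c : List Int), Dom_energyLeft n k c → Pre_energyLeft n k c → Spec_energyLeft n k c (energyLeft n k c)

-- ===== LEMMAS AND PROOFS =====

-- the energy drained at cloud i (0 if the lookup would raise; on Pre_ it never does)
def pvCost (c : List Int) (i : Int) : Int :=
  match PySem.List.pyGet? c i with
  | some v => if v = 0 then 1 else if v = 1 then 3 else 0
  | none => 0

lemma stepA_eq (c : List Int) (E i : Int) :
    (match PySem.List.pyGet? c i with
     | some v => if v = 0 then E - 1 else if v = 1 then E - 3 else E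
     | none => E) = E - pvCost c i := by
  unfold pvCost
  cases PySem.List.pyGet? c i with
  | none => dsimp only; ring
  | some v => dsimp only; split_ifs <;> ring

lemma stepB_eq (c : List Int) (d i : Int) :
    (match PySem.List.pyGet? c i with
     | some v => if v = 1 then d + 3 else if v = 0 then d + 1 else d
     | none => d) = d + pvCost c i := by
  unfold pvCost
  cases PySem.List.pyGet? c i with
  | none => dsimp only; ring
  | some v =>
      show (if v = 1 then d + 3 else if v = 0 then d + 1 else d)
          = d + (if v = 0 then 1 else if v = 1 then 3 else 0)
      split_ifs <;> omega

-- A's loop, abstracted over the visited sequence f: starting at f t (1 ≤ t ≤ M, where f hits 0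
-- exactly at t = M) with enough fuel, it drains pvCost at f t, …, f (M-1) and stops at 0.
lemma loopA_spec (n k : Int) (c : List Int) (f : ℕ → ℤ) (M : ℕ)
    (hstep : ∀ t, PySem.Int.mod (f t + k) n = f (t+1))
    (hzero : ∀ t, 1 ≤ t → t ≤ M → (f t = 0 ↔ t = M)) :
    ∀ (fuel t : ℕ) (E : ℤ), 1 ≤ t → t ≤ M → M - t ≤ fuel →
      energyLeftLoop n k c fuel (f t) E = (E - ∑ s ∈ Finset.Ico t M, pvCost c (f s), 0) := by
  intro fuel
  induction fuel with
  | zero =>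
    intro t E h1 h2 h3
    have ht : t = M := by omega
    have hf0 : f t = 0 := (hzero t h1 h2).mpr ht
    have hIco : Finset.Ico t M = ∅ := by rw [ht]; exact Finset.Ico_self M
    simp [energyLeftLoop, hf0, hIco]
  | succ fuel ih =>
    intro t E h1 h2 h3
    by_cases ht : t = M
    · have hf0 : f t = 0 := (hzero t h1 h2).mpr ht
      have hIco : Finset.Ico t M = ∅ := by rw [ht]; exact Finset.Ico_self M
      simp [energyLeftLoop, hf0, hIco]
    · have htM : t < M := by omega
      have hfz : f t ≠ 0 := fun h => ht ((hzero t h1 h2).mp h)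
      show energyLeftLoop n k c (fuel+1) (f t) E = _
      rw [energyLeftLoop]
      rw [if_neg hfz]
      rw [stepA_eq c E (f t), hstep t]
      rw [ih (t+1) (E - pvCost c (f t)) (by omega) (by omega) (by omega)]
      rw [Finset.sum_eq_sum_Ico_succ_bot htM]
      ring_nf

-- N ∣ t*k ↔ (N/gcd) ∣ t  (for 0 < N)
lemma pv_dvd_iff (N k t : ℤ) (hN : 0 < N) :
    N ∣ t * k ↔ (N / (Int.gcd N k : ℤ)) ∣ t := by
  have hgnat : 0 < Int.gcd N k :=
    Nat.pos_of_ne_zero (fun h => by have := Int.gcd_eq_zero_iff.mp h; omega)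
  have hg0 : (0 : ℤ) < (Int.gcd N k : ℤ) := by exact_mod_cast hgnat
  obtain ⟨m, hm⟩ := Int.gcd_dvd_left N k
  obtain ⟨k', hk'⟩ := Int.gcd_dvd_right N k
  have h3 : N / (Int.gcd N k : ℤ) * (Int.gcd N k : ℤ) = N := Int.ediv_mul_cancel (Int.gcd_dvd_left N k)
  have h4 : k / (Int.gcd N k : ℤ) * (Int.gcd N k : ℤ) = k := Int.ediv_mul_cancel (Int.gcd_dvd_right N k)
  have hNg : N / (Int.gcd N k : ℤ) = m := mul_right_cancel₀ (ne_of_gt hg0) (by linear_combination h3 + hm)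
  have hkg : k / (Int.gcd N k : ℤ) = k' := mul_right_cancel₀ (ne_of_gt hg0) (by linear_combination h4 + hk')
  have hco : Int.gcd m k' = 1 := by
    have h2 := Int.gcd_div_gcd_div_gcd (i := N) (j := k) hgnat
    rwa [hNg, hkg] at h2
  rw [hNg]
  constructor
  · intro hdvd
    have h1 : (Int.gcd N k : ℤ) * m ∣ (Int.gcd N k : ℤ) * (t * k') := by
      have e1 : (Int.gcd N k : ℤ) * m = N := hm.symm
      have e2 : (Int.gcd N k : ℤ) * (t * k') = t * k := by linear_combination (-t) * hk'
      rw [e1, e2]; exact hdvd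
    have h2 : m ∣ t * k' := (mul_dvd_mul_iff_left (by omega : (Int.gcd N k : ℤ) ≠ 0)).mp h1
    exact (Int.isCoprime_iff_gcd_eq_one.mpr hco).dvd_of_dvd_mul_right h2
  · rintro ⟨q, hq⟩
    exact ⟨q * k', by linear_combination k * hq + m * q * hk' - q * k' * hm⟩

lemma pv_emod_zero_iff (N k : ℤ) (hN : 0 < N) (t : ℕ) :
    ((t : ℤ) * k) % N = 0 ↔ (N / (Int.gcd N k : ℤ)) ∣ (t : ℤ) := by
  constructor
  · intro hz
    exact (pv_dvd_iff N k (t : ℤ) hN).mp (Int.dvd_of_emod_eq_zero hz)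
  · intro hd
    exact Int.emod_eq_zero_of_dvd ((pv_dvd_iff N k (t : ℤ) hN).mpr hd)

-- the reindexing at the heart of the equivalence: summing any h over the visited residues
-- (t*k) % N, t = 1..M-1, is summing h over the nonzero multiples of gcd below N
lemma orbit_sum (N k : ℤ) (hN : 0 < N) (h : ℤ → ℤ) :
    ∑ t ∈ Finset.Ico 1 ((N / (Int.gcd N k : ℤ)).toNat), h (((t : ℤ) * k) % N)
      = ∑ j ∈ Finset.Ico 1 ((N / (Int.gcd N k : ℤ)).toNat), h ((Int.gcd N k : ℤ) * (j : ℤ)) := by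
  have hgnat : 0 < Int.gcd N k :=
    Nat.pos_of_ne_zero (fun hh => by have := Int.gcd_eq_zero_iff.mp hh; omega)
  have hg0 : (0 : ℤ) < (Int.gcd N k : ℤ) := by exact_mod_cast hgnat
  have hGdvd : (Int.gcd N k : ℤ) ∣ N := Int.gcd_dvd_left N k
  have hMcast : (((N / (Int.gcd N k : ℤ)).toNat : ℤ)) = N / (Int.gcd N k : ℤ) :=
    Int.toNat_of_nonneg (Int.ediv_nonneg hN.le hg0.le)
  have hge : ∀ t : ℕ, (Int.gcd N k : ℤ) ∣ ((t : ℤ) * k) % N := by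
    intro t
    have h1 : ((t : ℤ) * k) % N % (Int.gcd N k : ℤ) = ((t : ℤ) * k) % (Int.gcd N k : ℤ) :=
      Int.emod_emod_of_dvd _ hGdvd
    have h2 : ((t : ℤ) * k) % (Int.gcd N k : ℤ) = 0 :=
      Int.emod_eq_zero_of_dvd ((Int.gcd_dvd_right N k).mul_left (t : ℤ))
    exact Int.dvd_of_emod_eq_zero (h1.trans h2)
  have hzero_iff := pv_emod_zero_iff N k hN

  have hinj : ∀ a ∈ Finset.Ico 1 ((N / (Int.gcd N k : ℤ)).toNat),
      ∀ b ∈ Finset.Ico 1 ((N / (Int.gcd N k : ℤ)).toNat),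
      ((a : ℤ) * k) % N = ((b : ℤ) * k) % N → a = b := by
    intro a ha b hb hab
    rw [Finset.mem_Ico] at ha hb
    have hd : N ∣ ((a : ℤ) - (b : ℤ)) * k := by
      have h1 : ((a : ℤ) * k - (b : ℤ) * k) % N = 0 :=
        Int.emod_eq_emod_iff_emod_sub_eq_zero.mp hab
      have h2 : N ∣ ((a : ℤ) * k - (b : ℤ) * k) := Int.dvd_of_emod_eq_zero h1
      have e : ((a : ℤ) - (b : ℤ)) * k = (a : ℤ) * k - (b : ℤ) * k := by ring
      rwa [e]
    have hd2 : (N / (Int.gcd N k : ℤ)) ∣ ((a : ℤ) - (b : ℤ)) := (pv_dvd_iff N k _ hN).mp hd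
    have hz : (a : ℤ) - (b : ℤ) = 0 := by
      apply Int.eq_zero_of_abs_lt_dvd hd2
      rw [← hMcast, abs_sub_lt_iff]
      constructor <;> omega
    omega
  have hM3 : N / (Int.gcd N k : ℤ) * (Int.gcd N k : ℤ) = N := Int.ediv_mul_cancel hGdvd
  have hsig : ∀ t ∈ Finset.Ico 1 ((N / (Int.gcd N k : ℤ)).toNat),
      (((((t : ℤ) * k) % N) / (Int.gcd N k : ℤ)).toNat : ℤ) * (Int.gcd N k : ℤ) = ((t : ℤ) * k) % N ∧
      ((((t : ℤ) * k) % N) / (Int.gcd N k : ℤ)).toNat ∈ Finset.Ico 1 ((N / (Int.gcd N k : ℤ)).toNat) := by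
    intro t ht
    rw [Finset.mem_Ico] at ht
    have hnn : 0 ≤ ((t : ℤ) * k) % N := Int.emod_nonneg _ (ne_of_gt hN)
    have hlt : ((t : ℤ) * k) % N < N := Int.emod_lt_of_pos _ hN
    have hpos : 0 < ((t : ℤ) * k) % N := by
      rcases lt_or_eq_of_le hnn with h | h
      · exact h
      · exfalso
        have hdt : (N / (Int.gcd N k : ℤ)) ∣ (t : ℤ) := (hzero_iff t).mp h.symm
        have h1 : N / (Int.gcd N k : ℤ) ≤ (t : ℤ) := Int.le_of_dvd (by exact_mod_cast ht.1) hdt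
        omega
    have hcancel : (((t : ℤ) * k) % N) / (Int.gcd N k : ℤ) * (Int.gcd N k : ℤ) = ((t : ℤ) * k) % N :=
      Int.ediv_mul_cancel (hge t)
    have hq1 : 1 ≤ (((t : ℤ) * k) % N) / (Int.gcd N k : ℤ) := by
      rw [Int.le_ediv_iff_mul_le hg0, one_mul]
      exact Int.le_of_dvd hpos (hge t)
    have hq2 : (((t : ℤ) * k) % N) / (Int.gcd N k : ℤ) < N / (Int.gcd N k : ℤ) := by
      by_contra hcon
      push Not at hcon
      have h5 : N / (Int.gcd N k : ℤ) * (Int.gcd N k : ℤ) ≤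
          (((t : ℤ) * k) % N) / (Int.gcd N k : ℤ) * (Int.gcd N k : ℤ) :=
        mul_le_mul_of_nonneg_right hcon hg0.le
      rw [hM3, hcancel] at h5
      omega
    have hc : ((((((t : ℤ) * k) % N) / (Int.gcd N k : ℤ)).toNat : ℤ)) = (((t : ℤ) * k) % N) / (Int.gcd N k : ℤ) :=
      Int.toNat_of_nonneg (by omega)
    refine ⟨by rw [hc]; exact hcancel, ?_⟩
    rw [Finset.mem_Ico]
    omega
  have hinjOn : Set.InjOn (fun (t : ℕ) => ((((t : ℤ) * k) % N) / (Int.gcd N k : ℤ)).toNat)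
      ↑(Finset.Ico 1 ((N / (Int.gcd N k : ℤ)).toNat)) := by
    intro a ha b hb hab
    have ha' := hsig a (by exact_mod_cast ha)
    have hb' := hsig b (by exact_mod_cast hb)
    apply hinj a (by exact_mod_cast ha) b (by exact_mod_cast hb)
    have := congrArg (fun x : ℕ => (x : ℤ) * (Int.gcd N k : ℤ)) hab
    simp only at this
    rw [ha'.1, hb'.1] at this
    exact this
  have himg : Finset.image (fun (t : ℕ) => ((((t : ℤ) * k) % N) / (Int.gcd N k : ℤ)).toNat)
      (Finset.Ico 1 ((N / (Int.gcd N k : ℤ)).toNat)) = Finset.Ico 1 ((N / (Int.gcd N k : ℤ)).toNat) := by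
    apply Finset.eq_of_subset_of_card_le
    · intro x hx
      rw [Finset.mem_image] at hx
      obtain ⟨t, ht, rfl⟩ := hx
      exact (hsig t ht).2
    · rw [Finset.card_image_of_injOn hinjOn]
  symm
  conv_lhs => rw [← himg]
  rw [Finset.sum_image hinjOn]
  apply Finset.sum_congr rfl
  intro t ht
  congr 1
  rw [mul_comm]
  exact (hsig t ht).1

-- exact division rounds up to itself
lemma pv_ediv_round (g x : ℤ) (hg : 0 < g) (hdvd : g ∣ x) : (x + g - 1) / g = x / g := by
  obtain ⟨m, hm⟩ := hdvd
  rw [hm, Int.mul_ediv_cancel_left m (ne_of_gt hg)]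
  have e : g * m + g - 1 = (g - 1) + g * m := by ring
  rw [e, Int.add_mul_ediv_left _ m (ne_of_gt hg),
    Int.ediv_eq_zero_of_lt (by omega) (by omega), zero_add]

lemma pyRange_pos_mult (n g : ℤ) (hg : 0 < g) (hn : 0 < n) (hdvd : g ∣ n) :
    PySem.List.pyRange 0 n g = (List.range (n / g).toNat).map (fun j : ℕ => g * (j : ℤ)) := by
  rw [PySem.List.pyRange_of_pos 0 n hg, if_pos hn]
  have e1 : (n - 0 + g - 1) / g = n / g := by
    rw [show n - 0 + g - 1 = (n + g - 1) from by ring]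
    exact pv_ediv_round g n hg hdvd
  rw [e1]
  simp only [zero_add]

lemma drain_eq (c : List Int) (L : List Int) :
    L.foldl (fun d i =>
      match PySem.List.pyGet? c i with
      | some v => if v = 1 then d + 3 else if v = 0 then d + 1 else d
      | none => d) 0 = (L.map (pvCost c)).sum := by
  have : (fun (d i : Int) =>
      match PySem.List.pyGet? c i with
      | some v => if v = 1 then d + 3 else if v = 0 then d + 1 else d
      | none => d) = fun d i => d + pvCost c i := by
    funext d i; exact stepB_eq c d i
  rw [this, PySem.List.foldl_add, zero_add]

lemma pv_main_pos (n k : Int) (c : List Int) (hn : 0 < n) :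
    energyLeft n k c = energyLeft_alt n k c := by
  have hgnat : 0 < Int.gcd n k :=
    Nat.pos_of_ne_zero (fun hh => by have := Int.gcd_eq_zero_iff.mp hh; omega)
  have hg0 : (0 : ℤ) < (Int.gcd n k : ℤ) := by exact_mod_cast hgnat
  have hGdvd : (Int.gcd n k : ℤ) ∣ n := Int.gcd_dvd_left n k
  have hMcast : (((n / (Int.gcd n k : ℤ)).toNat : ℤ)) = n / (Int.gcd n k : ℤ) :=
    Int.toNat_of_nonneg (Int.ediv_nonneg hn.le hg0.le)
  have hM1 : 1 ≤ (n / (Int.gcd n k : ℤ)).toNat := by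
    have h1 : (1 : ℤ) ≤ n / (Int.gcd n k : ℤ) := by
      rw [Int.le_ediv_iff_mul_le hg0, one_mul]
      exact Int.le_of_dvd hn hGdvd
    omega
  have hMle : ((((n / (Int.gcd n k : ℤ)).toNat) : ℤ)) ≤ n := by
    rw [hMcast]; exact Int.ediv_le_self _ hn.le
  have hstep : ∀ t : ℕ, PySem.Int.mod (((t : ℤ) * k) % n + k) n = (((t + 1 : ℕ) : ℤ) * k) % n := by
    intro t
    rw [PySem.Int.mod_eq_emod_of_pos hn, Int.emod_add_emod]
    congr 1
    push_cast
    ring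
  have hzero : ∀ t : ℕ, 1 ≤ t → t ≤ (n / (Int.gcd n k : ℤ)).toNat →
      ((((t : ℤ) * k) % n = 0) ↔ t = (n / (Int.gcd n k : ℤ)).toNat) := by
    intro t h1 h2
    rw [pv_emod_zero_iff n k hn t]
    constructor
    · intro hd
      have := Int.le_of_dvd (by exact_mod_cast h1) hd
      omega
    · intro ht
      rw [ht, hMcast]
  have hloop := loopA_spec n k c (fun t : ℕ => ((t : ℤ) * k) % n)
    ((n / (Int.gcd n k : ℤ)).toNat) hstep hzero (n.natAbs + 1) 1 100 le_rfl hM1 (by omega)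
  have hi0 : PySem.Int.mod (0 + k) n = (((1 : ℕ) : ℤ) * k) % n := by
    rw [PySem.Int.mod_eq_emod_of_pos hn]
    congr 1
    push_cast
    ring
  -- evaluate port A
  have hA : energyLeft n k c =
      100 - ∑ s ∈ Finset.Ico 1 ((n / (Int.gcd n k : ℤ)).toNat), pvCost c (((s : ℤ) * k) % n)
        - pvCost c 0 := by
    unfold energyLeft
    dsimp only
    dsimp only at hloop
    rw [hi0, hloop]
    rw [stepA_eq]
    simp
  -- evaluate port B
  have hB : energyLeft_alt n k c =
      100 - (pvCost c 0 +
        ∑ j ∈ Finset.Ico 1 ((n / (Int.gcd n k : ℤ)).toNat), pvCost c ((Int.gcd n k : ℤ) * (j : ℤ))) := by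
    unfold energyLeft_alt
    dsimp only
    rw [pyRange_pos_mult n (Int.gcd n k : ℤ) hg0 hn hGdvd, drain_eq, List.map_map]
    have hsum : ((List.range ((n / (Int.gcd n k : ℤ)).toNat)).map
        (pvCost c ∘ fun j : ℕ => (Int.gcd n k : ℤ) * (j : ℤ))).sum
        = ∑ j ∈ Finset.range ((n / (Int.gcd n k : ℤ)).toNat), pvCost c ((Int.gcd n k : ℤ) * (j : ℤ)) := rfl
    rw [hsum, Finset.range_eq_Ico, Finset.sum_eq_sum_Ico_succ_bot (by omega)]
    norm_num
  rw [hA, hB, orbit_sum n k hn (pvCost c)]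
  ring

theorem energyLeft_spec : Claim_equal_energyLeft := by
  intro n k c _hdom hpre
  unfold Spec_energyLeft
  exact pv_main_pos n k c hpre.1
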